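-- pv_equiv track=rewrite | github.com/ambrustorok/anki-words-builder | src/app.py | _get_foreign_field_key
-- ===== SOURCE A (Python) =====
-- from typing import List, Optional
--
-- def _get_foreign_field_key(deck: dict) -> Optional[str]:
--     for field in deck.get("field_schema", []):
--         if field.get("key") == "foreign_phrase":
--             return field["key"]
--     for field in deck.get("field_schema", []):
--         if field.get("required"):
--             return field["key"]
--     schema = deck.get("field_schema") or []
--     if schema:
--         return schema[0]["key"]
--     return None
-- ===== SOURCE B (Python) =====
-- from typing import Optional
--
--
-- def _get_foreign_field_key(deck: dict) -> Optional[str]: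
--     foreign = required = first = None
--     for field in deck.get("field_schema", []):
--         if foreign is None and field.get("key") == "foreign_phrase":
--             foreign = field
--         if required is None and field.get("required"):
--             required = field
--         if first is None:
--             first = field
--     chosen = foreign if foreign is not None else required if required is not None else first
--     return chosen["key"] if chosen is not None else None
-- ===== Notes on version B (the rewrite author's own statement) =====
-- stated objective: alternative
-- what changed: Three separate scans of the field schema (foreign-key pass, required pass, first-element fallback) are replaced by one pass that tracks three candidate slots and selects by priority afterwards.
import Mathlib
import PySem

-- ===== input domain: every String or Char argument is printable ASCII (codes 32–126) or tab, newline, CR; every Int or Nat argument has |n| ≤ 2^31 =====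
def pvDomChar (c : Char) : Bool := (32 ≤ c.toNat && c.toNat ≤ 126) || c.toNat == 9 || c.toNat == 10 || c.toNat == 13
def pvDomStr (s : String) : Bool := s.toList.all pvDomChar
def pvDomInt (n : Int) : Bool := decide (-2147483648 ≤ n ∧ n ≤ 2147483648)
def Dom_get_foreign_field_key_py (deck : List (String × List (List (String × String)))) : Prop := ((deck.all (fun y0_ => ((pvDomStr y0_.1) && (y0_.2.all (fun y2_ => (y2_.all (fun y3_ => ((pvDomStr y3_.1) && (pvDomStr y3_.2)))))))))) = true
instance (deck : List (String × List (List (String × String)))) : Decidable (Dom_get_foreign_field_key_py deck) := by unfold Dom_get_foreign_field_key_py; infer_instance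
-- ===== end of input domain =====

-- B replaces A's three scans of the field schema by one pass keeping three candidate slots (alternative decomposition, same cost).


-- shared primitives: Python dict lookup (first match) and Python truthiness of an optional string
def pvGet (f : List (String × String)) (k : String) : Option String := (PySem.Dict.mk f).get? k

def pvTruthy (o : Option String) : Bool := match o with | some s => s ≠ "" | none => false

-- ===== PORT A =====
-- first loop: 'return field["key"]' when field.get("key") == "foreign_phrase" (the key is then present)
def pvALoop1 : List (List (String × String)) → Option (Option String)
  | [] => none
  | f :: rest => if pvGet f "key" = some "foreign_phrase" then some (pvGet f "key") else pvALoop1 rest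

-- second loop: 'return field["key"]' when field.get("required") is truthy; a missing "key" is a
-- KeyError in Python (excluded by Pre_), rendered here as returning none
def pvALoop2 : List (List (String × String)) → Option (Option String)
  | [] => none
  | f :: rest => if pvTruthy (pvGet f "required") then some (pvGet f "key") else pvALoop2 rest

-- body of A after 'schema = deck.get("field_schema", [])'
def pvARun (schema : List (List (String × String))) : Option String :=
  match pvALoop1 schema with
  | some r => r
  | none =>
    match pvALoop2 schema with
    | some r => r
    | none =>
      match schema with
      | [] => none
      | f :: _ => pvGet f "key"   -- schema[0]["key"]; KeyError (excluded by Pre_) rendered as none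

def get_foreign_field_key_py (deck : List (String × List (List (String × String)))) : Option String :=
  pvARun ((PySem.Dict.mk deck).getD "field_schema" [])

-- ===== PORT B =====
-- one fold keeping (first foreign field, first required field, first field)
def pvBStep (st : Option (List (String × String)) × Option (List (String × String)) × Option (List (String × String)))
    (f : List (String × String)) :
    Option (List (String × String)) × Option (List (String × String)) × Option (List (String × String)) :=
  (if st.1.isNone && (pvGet f "key" == some "foreign_phrase") then some f else st.1,
   if st.2.1.isNone && pvTruthy (pvGet f "required") then some f else st.2.1,
   if st.2.2.isNone then some f else st.2.2)

-- body of B after 'schema = deck.get("field_schema", [])'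
def pvBRun (schema : List (List (String × String))) : Option String :=
  let st := schema.foldl pvBStep (none, none, none)
  match st.1.or (st.2.1.or st.2.2) with
  | some f => pvGet f "key"   -- chosen["key"]; KeyError (excluded by Pre_) rendered as none
  | none => none

def get_foreign_field_key_py_alt (deck : List (String × List (List (String × String)))) : Option String :=
  pvBRun ((PySem.Dict.mk deck).getD "field_schema" [])

-- ===== PRECONDITION & SPEC =====
-- Pre_ excludes exactly the inputs where Python A raises KeyError: the field selected by the
-- priority rule (first required field if no foreign field, else the first field) has no "key" entry.
def Pre_get_foreign_field_key_py (deck : List (String × List (List (String × String)))) : Prop :=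
  ((PySem.Dict.mk deck).getD "field_schema" []).find? (fun f => pvGet f "key" == some "foreign_phrase") = none →
    (match ((PySem.Dict.mk deck).getD "field_schema" []).find? (fun f => pvTruthy (pvGet f "required")) with
     | some g => (pvGet g "key").isSome
     | none =>
       match (PySem.Dict.mk deck).getD "field_schema" [] with
       | [] => true
       | f :: _ => (pvGet f "key").isSome) = true
instance (deck : List (String × List (List (String × String)))) : Decidable (Pre_get_foreign_field_key_py deck) := by unfold Pre_get_foreign_field_key_py; infer_instance

def pvWitness_get_foreign_field_key_py : (List (String × List (List (String × String)))) :=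
  [("field_schema", [[("key", "word"), ("required", "1")], [("key", "foreign_phrase")]])]

def Spec_get_foreign_field_key_py (deck : List (String × List (List (String × String)))) (out : Option String) : Prop := out = get_foreign_field_key_py_alt deck
instance (deck : List (String × List (List (String × String)))) (out : Option String) : Decidable (Spec_get_foreign_field_key_py deck out) := by unfold Spec_get_foreign_field_key_py; infer_instance

-- ===== CLAIM (what is proved, stated in full; the proofs are below) =====
def Claim_equal_get_foreign_field_key_py : Prop := ∀ (deck : List (String × List (List (String × String)))), Dom_get_foreign_field_key_py deck → Pre_get_foreign_field_key_py deck → Spec_get_foreign_field_key_py deck (get_foreign_field_key_py deck)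

-- ===== LEMMAS AND PROOFS =====

lemma pvALoop1_eq_find (l : List (List (String × String))) :
    pvALoop1 l = (l.find? (fun f => pvGet f "key" == some "foreign_phrase")).map (fun f => pvGet f "key") := by
  induction l with
  | nil => rfl
  | cons f rest ih =>
    by_cases h : pvGet f "key" = some "foreign_phrase"
    · have hb : (pvGet f "key" == some "foreign_phrase") = true := by simp [h]
      simp [pvALoop1, List.find?, h]
    · have hb : (pvGet f "key" == some "foreign_phrase") = false := by simp [h]
      simp [pvALoop1, List.find?, hb, h, ih]

lemma pvALoop2_eq_find (l : List (List (String × String))) :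
    pvALoop2 l = (l.find? (fun f => pvTruthy (pvGet f "required"))).map (fun f => pvGet f "key") := by
  induction l with
  | nil => rfl
  | cons f rest ih =>
    by_cases h : pvTruthy (pvGet f "required") = true <;>
      simp_all [pvALoop2, List.find?, Bool.not_eq_true]

lemma pvB_foldl_eq (l : List (List (String × String))) (st : Option (List (String × String)) × Option (List (String × String)) × Option (List (String × String))) :
    l.foldl pvBStep st =
      (st.1.or (l.find? (fun f => pvGet f "key" == some "foreign_phrase")),
       st.2.1.or (l.find? (fun f => pvTruthy (pvGet f "required"))),
       st.2.2.or l.head?) := by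
  induction l generalizing st with
  | nil => simp
  | cons f rest ih =>
    obtain ⟨a, b, c⟩ := st
    rw [List.foldl_cons, ih]
    rcases hb1 : (pvGet f "key" == some "foreign_phrase") with _ | _ <;>
      rcases hb2 : pvTruthy (pvGet f "required") with _ | _ <;>
      cases a <;> cases b <;> cases c <;>
        simp [pvBStep, List.find?, hb1, hb2]

lemma pvRun_eq (schema : List (List (String × String))) : pvARun schema = pvBRun schema := by
  unfold pvARun pvBRun
  rw [pvALoop1_eq_find, pvALoop2_eq_find, pvB_foldl_eq]
  cases hF : schema.find? (fun f => pvGet f "key" == some "foreign_phrase") with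
  | some f => simp
  | none =>
    cases hR : schema.find? (fun f => pvTruthy (pvGet f "required")) with
    | some g => simp
    | none =>
      cases schema with
      | nil => simp
      | cons f rest => simp

-- ===== VERDICT (by name: the statement is the Claim_ definition above) =====
theorem get_foreign_field_key_py_spec : Claim_equal_get_foreign_field_key_py := by
  intro deck _ _
  unfold Spec_get_foreign_field_key_py get_foreign_field_key_py get_foreign_field_key_py_alt
  exact pvRun_eq _
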